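-- pv_equiv track=rewrite | github.com/chaeeerish/Algorithm-Python | 교재별/이것이 취업을 위한 코딩테스트다/1. 그리디/무지의 먹방 라이브 - 효율성.py | solution
-- ===== SOURCE A (Python) =====
-- from operator import itemgetter
--
-- def solution(food_times, k):
--     foods = []
--     n = len(food_times)
--     for i in range(n):
--         foods.append((food_times[i], i + 1))
--     foods.sort()
--
--     pretime = 0
--     for i, food in enumerate(foods):
--         diff = food[0] - pretime
--         if diff != 0:
--             spend = diff * n
--             if spend <= k:
--                 k -= spend
--                 pretime = food[0]
--             else:
--                 k %= n
--                 sublist = sorted(foods[i:], key=itemgetter(1))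
--                 return sublist[k][1]
--         n -= 1
--
--     return -1
-- ===== SOURCE B (Python) =====
-- def solution(food_times, k):
--     # Binary search on the stopping time level: cum(t) = total seconds needed to
--     # finish every food down to level t; the show stops at the first distinct
--     # time whose cumulative cost exceeds k (cum is monotone), found by bisection
--     # instead of a sweep.
--     def cum(t):
--         return sum(min(x, t) for x in food_times)
--
--     D = sorted(set(food_times))
--     cand = D[1:] if D and D[0] == 0 else D
--     lo, hi = 0, len(cand)
--     while lo < hi:
--         mid = (lo + hi) // 2
--         if cum(cand[mid]) > k:
--             hi = mid
--         else:
--             lo = mid + 1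
--     if lo == len(cand):
--         return -1
--     t = cand[lo]
--     spent = cum(cand[lo - 1]) if lo > 0 else 0
--     alive = [i + 1 for i, x in enumerate(food_times) if x >= t]
--     return alive[(k - spent) % len(alive)]
-- ===== Notes on version B (the rewrite author's own statement) =====
-- stated objective: alternative
-- what changed: B replaces A's cumulative sweep over the sorted pair list by a closed-form cost function cum(t)=sum(min(x,t)) and a binary search for the first distinct time whose cumulative cost exceeds k, then reads the answer directly from that level; no pair list, no running pretime/remaining-count state.
import Mathlib
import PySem

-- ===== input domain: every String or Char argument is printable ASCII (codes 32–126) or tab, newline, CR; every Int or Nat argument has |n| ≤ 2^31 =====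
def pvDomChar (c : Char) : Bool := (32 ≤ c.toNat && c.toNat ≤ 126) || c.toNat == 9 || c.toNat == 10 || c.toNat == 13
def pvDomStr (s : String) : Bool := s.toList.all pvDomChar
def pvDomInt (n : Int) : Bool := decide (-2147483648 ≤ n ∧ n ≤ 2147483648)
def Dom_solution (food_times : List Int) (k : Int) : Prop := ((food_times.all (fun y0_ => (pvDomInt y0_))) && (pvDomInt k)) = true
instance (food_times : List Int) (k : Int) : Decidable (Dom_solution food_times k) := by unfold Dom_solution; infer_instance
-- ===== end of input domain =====

-- B determines the stopping level by bisecting the monotone cumulative-cost function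
-- cum(t) = sum(min(x,t)) over the sorted distinct times, instead of A's stateful sweep.

-- ===== PORT A =====
-- foods = [(food_times[i], i+1) for i in range(n)]  (built by append in a range loop)
def pvPairs (food_times : List Int) : List (Int × Int) :=
  (PySem.List.pyRange 0 (food_times.length : Int) 1).foldl
    (fun acc i => acc ++ [(PySem.List.pyGetD food_times i 0, i + 1)]) []

-- the 'for i, food in enumerate(foods)' loop of A, walking the sorted suffix
def pvLoopA : List (Int × Int) → Int → Int → Int → Int
  | [], _, _, _ => -1
  | food :: rest, pretime, n, k =>
    if food.1 - pretime ≠ 0 then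
      if (food.1 - pretime) * n ≤ k then
        pvLoopA rest food.1 (n - 1) (k - (food.1 - pretime) * n)
      else
        -- k %= n; sublist = sorted(foods[i:], key=itemgetter(1)); return sublist[k][1]
        match PySem.List.pyGet? (PySem.List.sorted (food :: rest) Prod.snd false) (PySem.Int.mod k n) with
        | some p => p.2
        | none => 0  -- IndexError branch, unreachable (the index is always in range here)
    else
      pvLoopA rest pretime (n - 1) k

def solution (food_times : List Int) (k : Int) : Int :=
  pvLoopA (PySem.List.sorted2 (pvPairs food_times) Prod.fst Prod.snd false) 0
    (food_times.length : Int) k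

-- ===== PORT B =====
-- cum(t) = sum(min(x, t) for x in food_times)
def pvCum (ft : List Int) (t : Int) : Int := ft.foldl (fun a x => a + min x t) 0

-- the 'while lo < hi' bisection loop of B (cand[mid] is always in range here, so getD is exact)
def pvBS (ft cand : List Int) (k : Int) (lo hi : Nat) : Nat :=
  if _h : lo < hi then
    if k < pvCum ft (cand.getD ((lo + hi) / 2) 0) then
      pvBS ft cand k lo ((lo + hi) / 2)
    else
      pvBS ft cand k ((lo + hi) / 2 + 1) hi
  else lo
termination_by hi - lo
decreasing_by all_goals omega

def solution_alt (food_times : List Int) (k : Int) : Int :=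
  let D := PySem.List.sorted (PySem.Set.ofList food_times) (fun x => x) false
  let cand := match D with
    | [] => ([] : List Int)
    | d :: rest => if d = 0 then rest else d :: rest
  let lo := pvBS food_times cand k 0 cand.length
  if lo = cand.length then -1
  else
    let t := cand.getD lo 0
    let spent := if 0 < lo then pvCum food_times (cand.getD (lo - 1) 0) else 0
    let alive := (PySem.List.enumerate food_times 0).filterMap
      (fun q => if t ≤ q.2 then some (q.1 + 1) else none)
    match PySem.List.pyGet? alive (PySem.Int.mod (k - spent) (alive.length : Int)) with
    | some v => v
    | none => 0  -- unreachable (the alive list is nonempty and the index is in range)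

-- ===== PRECONDITION & SPEC =====
def Spec_solution (food_times : List Int) (k : Int) (out : Int) : Prop := out = solution_alt food_times k
instance (food_times : List Int) (k : Int) (out : Int) : Decidable (Spec_solution food_times k out) := by unfold Spec_solution; infer_instance

-- ===== CLAIM (what is proved, stated in full; the proofs are below) =====
def Claim_equal_solution : Prop := ∀ (food_times : List Int) (k : Int), Dom_solution food_times k → Spec_solution food_times k (solution food_times k)

-- ===== LEMMAS AND PROOFS =====

-- abbreviations used only by the proofs
def pvS0 (ft : List Int) : List (Int × Int) :=
  PySem.List.sorted2 (pvPairs ft) Prod.fst Prod.snd false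

def pvD (ft : List Int) : List Int :=
  PySem.List.sorted (PySem.Set.ofList ft) (fun x => x) false

def pvCand (ft : List Int) : List Int :=
  match pvD ft with
  | [] => ([] : List Int)
  | d :: rest => if d = 0 then rest else d :: rest

def pvCntGE (ft : List Int) (t : Int) : Int := (ft.countP (fun x => decide (t ≤ x)) : Int)

-- the value B returns when the show stops at level t having fully paid `spent`
def pvOut (ft : List Int) (k t spent : Int) : Int :=
  let alive := (PySem.List.enumerate ft 0).filterMap
    (fun q => if t ≤ q.2 then some (q.1 + 1) else none)
  match PySem.List.pyGet? alive (PySem.Int.mod (k - spent) (alive.length : Int)) with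
  | some v => v
  | none => 0

-- linear reference scan over the candidate levels (bridge between A's sweep and B's bisection)
def pvLin (ft : List Int) (k : Int) : List Int → Int → Int
  | [], _ => -1
  | t :: ts, spent =>
    if k < pvCum ft t then pvOut ft k t spent else pvLin ft k ts (pvCum ft t)

-- Python's lexicographic tuple order on (time, index) pairs
def pvLexLe (p q : Int × Int) : Prop := p.1 < q.1 ∨ (p.1 = q.1 ∧ p.2 ≤ q.2)
def pvLexLt (p q : Int × Int) : Prop := p.1 < q.1 ∨ (p.1 = q.1 ∧ p.2 < q.2)
def pvLexB (a b : Int × Int) : Bool :=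
  decide (a.1 < b.1) || (!decide (b.1 < a.1) && decide (a.2 < b.2))

theorem pvLexB_eq (a b : Int × Int) : pvLexB a b = true ↔ pvLexLt a b := by
  simp [pvLexB, pvLexLt]; omega

theorem pvInsertBy_pairwise (x : Int × Int) (ys : List (Int × Int))
    (h : ys.Pairwise pvLexLe) :
    (PySem.List.insertBy pvLexB x ys).Pairwise pvLexLe := by
  induction ys with
  | nil => simp [PySem.List.insertBy, pvLexLe]
  | cons y ys ih =>
    rw [List.pairwise_cons] at h
    by_cases hb : pvLexB x y = true
    · have hxy : pvLexLt x y := (pvLexB_eq x y).1 hb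
      simp only [PySem.List.insertBy, hb, if_pos]
      refine List.Pairwise.cons ?_ (List.Pairwise.cons h.1 h.2)
      intro z hz
      rcases List.mem_cons.1 hz with rfl | hz
      · unfold pvLexLt at hxy; unfold pvLexLe; omega
      · have hyz := h.1 z hz
        unfold pvLexLt at hxy; unfold pvLexLe at hyz ⊢; omega
    · simp only [PySem.List.insertBy, hb, Bool.false_eq_true, if_false]
      refine List.Pairwise.cons ?_ (ih h.2)
      intro z hz
      rw [PySem.List.insertBy_mem_iff] at hz
      rcases hz with he | hz
      · rw [he]
        have hnlt : ¬ pvLexLt x y := fun hc => hb ((pvLexB_eq x y).2 hc)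
        unfold pvLexLt at hnlt; unfold pvLexLe; omega
      · exact h.1 z hz

theorem pvFoldl_insertBy_pairwise (xs : List (Int × Int)) :
    ∀ acc : List (Int × Int), acc.Pairwise pvLexLe →
    (xs.foldl (fun acc x => PySem.List.insertBy pvLexB x acc) acc).Pairwise pvLexLe := by
  induction xs with
  | nil => intro acc h; exact h
  | cons x xs ih => intro acc h; exact ih _ (pvInsertBy_pairwise x acc h)

theorem pvSorted2_def (xs : List (Int × Int)) :
    PySem.List.sorted2 xs Prod.fst Prod.snd false
      = xs.foldl (fun acc x => PySem.List.insertBy pvLexB x acc) [] := rfl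

theorem pvSorted2_pairwise (xs : List (Int × Int)) :
    (PySem.List.sorted2 xs Prod.fst Prod.snd false).Pairwise pvLexLe := by
  rw [pvSorted2_def]
  exact pvFoldl_insertBy_pairwise xs [] List.Pairwise.nil

-- foods as a map over enumerate
theorem pvPairs_eq (ft : List Int) :
    pvPairs ft = (PySem.List.enumerate ft 0).map (fun p => (p.2, p.1 + 1)) := by
  unfold pvPairs
  rw [PySem.List.foldl_append_singleton_eq_map]
  rw [PySem.List.enumerate_eq_map_pyRange (d := 0)]
  rw [List.map_map]
  rfl

theorem pvPairs_length (ft : List Int) : (pvPairs ft).length = ft.length := by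
  rw [pvPairs_eq, List.length_map, PySem.List.length_enumerate]

-- [g(x) for x in l if c(x)]
theorem pvFilterMap_if {α β : Type} (c : α → Prop) [DecidablePred c] (g : α → β) (l : List α) :
    l.filterMap (fun a => if c a then some (g a) else none)
      = (l.filter (fun a => decide (c a))).map g := by
  induction l with
  | nil => rfl
  | cons x xs ih =>
    by_cases h : c x
    · simp [h, ih]
    · simp [h, ih]

-- splitting a time-sorted list at a time value
theorem pvFilter_split (t : Int) (l : List (Int × Int))
    (h : l.Pairwise (fun a b => a.1 ≤ b.1)) :
    l.filter (fun p => decide (t ≤ p.1))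
      = l.filter (fun p => decide (p.1 = t)) ++ l.filter (fun p => decide (t < p.1)) := by
  induction l with
  | nil => rfl
  | cons x xs ih =>
    rw [List.pairwise_cons] at h
    rcases lt_trichotomy x.1 t with hx | hx | hx
    · have h1 : decide (t ≤ x.1) = false := by simp; omega
      have h2 : decide (x.1 = t) = false := by simp; omega
      have h3 : decide (t < x.1) = false := by simp; omega
      simp only [List.filter_cons, h1, h2, h3, Bool.false_eq_true, if_false]
      exact ih h.2
    · have h1 : decide (t ≤ x.1) = true := by simp; omega
      have h2 : decide (x.1 = t) = true := by simp [hx]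
      have h3 : decide (t < x.1) = false := by simp; omega
      simp only [List.filter_cons, h1, h2, h3, Bool.false_eq_true, if_false, if_true,
        List.cons_append]
      rw [ih h.2]
    · have h1 : decide (t ≤ x.1) = true := by simp; omega
      have h2 : decide (x.1 = t) = false := by simp; omega
      have h3 : decide (t < x.1) = true := by simp [hx]
      simp only [List.filter_cons, h1, h2, h3, Bool.false_eq_true, if_false, if_true]
      have hnil : xs.filter (fun p => decide (p.1 = t)) = [] := by
        rw [List.filter_eq_nil_iff]
        intro a ha
        have := h.1 a ha
        simp; omega
      rw [hnil, List.nil_append]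
      have heq : xs.filter (fun p => decide (t ≤ p.1)) = xs.filter (fun p => decide (t < p.1)) := by
        apply List.filter_congr
        intro a ha
        have := h.1 a ha
        simp; omega
      rw [heq]

-- A's loop consumes a block of foods whose time equals pretime without spending
theorem pvLoopA_skip : ∀ (G S : List (Int × Int)) (pre n k : Int),
    (∀ p ∈ G, p.1 = pre) →
    pvLoopA (G ++ S) pre n k = pvLoopA S pre (n - G.length) k
  | [], S, pre, n, k, _ => by simp
  | g :: G, S, pre, n, k, hall => by
    have hg : g.1 = pre := hall g List.mem_cons_self
    rw [List.cons_append]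
    simp only [pvLoopA]
    rw [if_neg (by omega)]
    rw [pvLoopA_skip G S pre (n - 1) k (fun p hp => hall p (List.mem_cons_of_mem _ hp))]
    congr 1
    simp only [List.length_cons]
    push_cast
    ring

-- A's loop consumes a block of foods of equal time t ≠ pre when it can afford it
theorem pvLoopA_spend (G S : List (Int × Int)) (t pre n k : Int)
    (hne : G ≠ []) (hall : ∀ p ∈ G, p.1 = t) (hpre : t ≠ pre)
    (hk : (t - pre) * n ≤ k) :
    pvLoopA (G ++ S) pre n k = pvLoopA S t (n - G.length) (k - (t - pre) * n) := by
  match G, hne with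
  | g :: G, _ =>
    have hg : g.1 = t := hall g List.mem_cons_self
    rw [List.cons_append]
    simp only [pvLoopA]
    rw [if_pos (by omega : g.1 - pre ≠ 0),
      if_pos (show (g.1 - pre) * n ≤ k by rw [hg]; exact hk)]
    rw [hg]
    rw [pvLoopA_skip G S t (n - 1) (k - (t - pre) * n)
      (fun p hp => hall p (List.mem_cons_of_mem _ hp))]
    congr 1
    simp only [List.length_cons]
    push_cast
    ring

theorem pvSorted2_perm_pairs (ft : List Int) :
    (pvS0 ft).Perm (pvPairs ft) :=
  PySem.List.sorted2_perm _ _ _ _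

theorem pvMem_S0 (ft : List Int) (p : Int × Int)
    (hp : p ∈ pvS0 ft) : p.1 ∈ ft := by
  have hm := (pvSorted2_perm_pairs ft).mem_iff.1 hp
  rw [pvPairs_eq] at hm
  rcases List.mem_map.1 hm with ⟨x, hx, rfl⟩
  rcases (PySem.List.mem_enumerate_iff _ _ _).1 hx with ⟨i, hi, rfl⟩
  exact List.getElem_mem hi

theorem pvS0_pairwise_le (ft : List Int) :
    (pvS0 ft).Pairwise (fun a b : Int × Int => a.1 ≤ b.1) :=
  (pvSorted2_pairwise (pvPairs ft)).imp (by intro a b h; unfold pvLexLe at h; omega)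

-- every element of ft either lies in the suffix ts of the sorted distinct times,
-- or is strictly below everything in ts
theorem pvSuffix_facts (ft ts : List Int) (hsuf : ts <:+ pvD ft) :
    ∀ x ∈ ft, x ∈ ts ∨ ∀ y ∈ ts, x < y := by
  intro x hx
  obtain ⟨P, hP⟩ := hsuf
  have hxD : x ∈ pvD ft :=
    (PySem.List.mem_sorted _ _ _ x).2 ((PySem.Set.mem_ofList ft x).2 hx)
  have hpw : (pvD ft).Pairwise (· < ·) := PySem.List.sorted_ofList_pairwise_lt (κ := Int) ft
  rw [← hP] at hxD hpw
  rcases List.mem_append.1 hxD with h | h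
  · exact Or.inr (fun y hy => (List.pairwise_append.1 hpw).2.2 x h y hy)
  · exact Or.inl h

-- splitting the filtered pair list at the head of a suffix of distinct times
theorem pvSplit (ft : List Int) (t : Int) (ts' : List Int)
    (hsuf : (t :: ts') <:+ pvD ft) :
    ((pvS0 ft).filter (fun p => decide (p.1 ∈ t :: ts'))
        = (pvS0 ft).filter (fun p => decide (p.1 = t))
          ++ (pvS0 ft).filter (fun p => decide (p.1 ∈ ts')))
    ∧ ((pvS0 ft).filter (fun p => decide (p.1 ∈ t :: ts'))
        = (pvS0 ft).filter (fun p => decide (t ≤ p.1))) := by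
  have hts0 : (pvD ft).Pairwise (· < ·) := PySem.List.sorted_ofList_pairwise_lt (κ := Int) ft
  have hsufp : (t :: ts').Pairwise (· < ·) := hts0.sublist hsuf.sublist
  have hclose : ∀ x ∈ ft, t ≤ x → x ∈ t :: ts' := by
    intro x hx htx
    rcases pvSuffix_facts ft (t :: ts') hsuf x hx with h | h
    · exact h
    · have := h t List.mem_cons_self; omega
  have eq1 : (pvS0 ft).filter (fun p => decide (p.1 ∈ t :: ts'))
      = (pvS0 ft).filter (fun p => decide (t ≤ p.1)) := by
    apply List.filter_congr
    intro p hp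
    have hpft := pvMem_S0 ft p hp
    apply decide_eq_decide.2
    constructor
    · intro h
      rcases List.mem_cons.1 h with he | h
      · omega
      · have := List.rel_of_pairwise_cons hsufp h
        omega
    · intro h
      exact hclose p.1 hpft h
  have eq3 : (pvS0 ft).filter (fun p => decide (t < p.1))
      = (pvS0 ft).filter (fun p => decide (p.1 ∈ ts')) := by
    apply List.filter_congr
    intro p hp
    have hpft := pvMem_S0 ft p hp
    apply decide_eq_decide.2
    constructor
    · intro h
      have h2 := hclose p.1 hpft (le_of_lt h)
      rcases List.mem_cons.1 h2 with he | h2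
      · omega
      · exact h2
    · intro h
      exact List.rel_of_pairwise_cons hsufp h
  refine ⟨?_, eq1⟩
  rw [eq1, pvFilter_split t _ (pvS0_pairwise_le ft), eq3]

-- cum as a plain sum
theorem pvCum_eq_sum (ft : List Int) (t : Int) :
    pvCum ft t = (ft.map (fun x => min x t)).sum := by
  unfold pvCum
  rw [PySem.List.foldl_add (g := fun x => min x t)]
  rw [zero_add]

theorem pvCum_mono (ft : List Int) {s t : Int} (h : s ≤ t) : pvCum ft s ≤ pvCum ft t := by
  rw [pvCum_eq_sum, pvCum_eq_sum]
  induction ft with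
  | nil => simp
  | cons x xs ih =>
    simp only [List.map_cons, List.sum_cons]
    have : min x s ≤ min x t := by omega
    omega

theorem pvCum_gap (ft : List Int) (p t : Int) (hpt : p ≤ t)
    (h : ∀ x ∈ ft, x ≤ p ∨ t ≤ x) :
    pvCum ft t = pvCum ft p + (t - p) * pvCntGE ft t := by
  rw [pvCum_eq_sum, pvCum_eq_sum]
  unfold pvCntGE
  induction ft with
  | nil => simp
  | cons x xs ih =>
    have hx := h x List.mem_cons_self
    have ih' := ih (fun y hy => h y (List.mem_cons_of_mem _ hy))
    simp only [List.map_cons, List.sum_cons, List.countP_cons]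
    by_cases htx : t ≤ x
    · have h1 : min x t = t := by omega
      have h2 : min x p = p := by omega
      simp only [htx, decide_true, if_pos]
      rw [h1, h2]
      push_cast
      have : (t - p) * ((xs.countP (fun x => decide (t ≤ x)) : Int) + 1)
          = (t - p) * (xs.countP (fun x => decide (t ≤ x)) : Int) + (t - p) := by ring
      rw [this]
      omega
    · have hxp : x ≤ p := hx.resolve_right htx
      have h1 : min x t = x := by omega
      have h2 : min x p = x := by omega
      simp only [htx, decide_false, Bool.false_eq_true, if_false, add_zero]
      rw [h1, h2]
      omega

theorem pvCum_min (ft : List Int) (t : Int) (h : ∀ x ∈ ft, t ≤ x) :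
    pvCum ft t = t * (ft.length : Int) := by
  rw [pvCum_eq_sum]
  induction ft with
  | nil => simp
  | cons x xs ih =>
    have hx := h x List.mem_cons_self
    have ih' := ih (fun y hy => h y (List.mem_cons_of_mem _ hy))
    simp only [List.map_cons, List.sum_cons, List.length_cons]
    rw [show min x t = t by omega, ih']
    push_cast
    ring

theorem pvCum_zero (ft : List Int) (h : ∀ x ∈ ft, 0 ≤ x) : pvCum ft 0 = 0 := by
  rw [pvCum_eq_sum]
  induction ft with
  | nil => rfl
  | cons x xs ih =>
    have hx := h x List.mem_cons_self
    have ih' := ih (fun y hy => h y (List.mem_cons_of_mem _ hy))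
    simp only [List.map_cons, List.sum_cons]
    rw [show min x 0 = 0 by omega, ih']
    ring

theorem pvCntGE_all (ft : List Int) (t : Int) (h : ∀ x ∈ ft, t ≤ x) :
    pvCntGE ft t = (ft.length : Int) := by
  unfold pvCntGE
  congr 1
  rw [List.countP_eq_length]
  intro a ha
  simpa using h a ha

-- length of the pairs with time ≥ t equals the count of foods ≥ t
theorem pvS0_filter_fst_len (ft : List Int) (t : Int) :
    ((((pvS0 ft).filter (fun p => decide (t ≤ p.1))).length : Nat) : Int) = pvCntGE ft t := by
  unfold pvCntGE
  congr 1
  rw [← List.countP_eq_length_filter, (pvSorted2_perm_pairs ft).countP_eq, pvPairs_eq,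
    List.countP_map]
  conv_rhs => rw [← PySem.List.map_snd_enumerate ft 0, List.countP_map]
  apply List.countP_congr
  intro a _
  simp [Function.comp]

-- main correspondence: A's sweep on the pairs whose time lies in the remaining
-- suffix ts equals the linear reference scan over ts
theorem pvMain2 (ft : List Int) (k : Int) : ∀ (ts : List Int) (p spent : Int),
    ts <:+ pvD ft →
    (∀ t ∈ ts.head?, t ≠ p) →
    (∀ t ∈ ts.head?, spent + (t - p) * pvCntGE ft t = pvCum ft t) →
    pvLoopA ((pvS0 ft).filter (fun q => decide (q.1 ∈ ts))) p
        ((((pvS0 ft).filter (fun q => decide (q.1 ∈ ts))).length : Nat) : Int) (k - spent)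
      = pvLin ft k ts spent := by
  intro ts
  induction ts with
  | nil =>
    intro p spent _ _ _
    simp [pvLoopA, pvLin]
  | cons t ts' ih =>
    intro p spent hsuf hne hsp
    have hts0 : (pvD ft).Pairwise (· < ·) := PySem.List.sorted_ofList_pairwise_lt (κ := Int) ft
    have hsufp : (t :: ts').Pairwise (· < ·) := hts0.sublist hsuf.sublist
    have htft : t ∈ ft := by
      have h1 : t ∈ pvD ft := hsuf.subset List.mem_cons_self
      exact (PySem.Set.mem_ofList ft t).1 ((PySem.List.mem_sorted _ _ _ t).1 h1)
    obtain ⟨hSplit, eq1⟩ := pvSplit ft t ts' hsuf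
    obtain ⟨G, hG⟩ : ∃ G, G = (pvS0 ft).filter (fun p => decide (p.1 = t)) := ⟨_, rfl⟩
    obtain ⟨R, hR⟩ : ∃ R, R = (pvS0 ft).filter (fun p => decide (p.1 ∈ ts')) := ⟨_, rfl⟩
    rw [← hG, ← hR] at hSplit
    have hGall : ∀ p ∈ G, p.1 = t := by
      intro p hp
      rw [hG] at hp
      simpa using (List.mem_filter.1 hp).2
    have hGne : G ≠ [] := by
      obtain ⟨i, hi, hit⟩ := List.mem_iff_getElem.1 htft
      have hpmem : ((t, (i : Int) + 1) : Int × Int) ∈ pvS0 ft := by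
        rw [(pvSorted2_perm_pairs ft).mem_iff, pvPairs_eq]
        apply List.mem_map.2
        refine ⟨((i : Int), t), ?_, rfl⟩
        apply (PySem.List.mem_enumerate_iff _ _ _).2
        exact ⟨i, hi, by simp [hit]⟩
      intro hnil
      have hmem : ((t, (i : Int) + 1) : Int × Int) ∈ G := by
        rw [hG]; exact List.mem_filter.2 ⟨hpmem, by simp⟩
      rw [hnil] at hmem
      simp at hmem
    have hn : (((G ++ R).length : Nat) : Int) = pvCntGE ft t := by
      rw [← hSplit, eq1]
      exact pvS0_filter_fst_len ft t
    have htp : t ≠ p := hne t rfl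
    have hspt : spent + (t - p) * pvCntGE ft t = pvCum ft t := hsp t rfl
    have hnum : spent + (t - p) * (((G ++ R).length : Nat) : Int) = pvCum ft t := by
      rw [hn]; exact hspt
    have harith : (((G ++ R).length : Nat) : Int) - (G.length : Int) = (R.length : Int) := by
      simp only [List.length_append]
      push_cast
      ring
    rw [hSplit]
    by_cases hstop : k < pvCum ft t
    · -- the show ends inside the group of time t
      obtain ⟨g, G', rfl⟩ : ∃ g G', G = g :: G' := by
        cases G with
        | nil => exact absurd rfl hGne
        | cons a b => exact ⟨a, b, rfl⟩
      have hg : g.1 = t := hGall g List.mem_cons_self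
      simp only [List.cons_append] at hnum ⊢
      simp only [pvLoopA, pvLin]
      rw [if_pos (show g.1 - p ≠ 0 by rw [hg]; omega),
        if_neg (show ¬ (g.1 - p) * (((g :: (G' ++ R)).length : Nat) : Int) ≤ k - spent by
          rw [hg]
          intro hc
          linarith),
        if_pos hstop]
      -- both sides return the (k - spent) mod n -th surviving food
      have hW : PySem.List.sorted (g :: (G' ++ R)) Prod.snd false
          = ((PySem.List.enumerate ft 0).filter (fun x => decide (t ≤ x.2))).map
              (fun p => (p.2, p.1 + 1)) := by
        apply PySem.List.sorted_eq_of_perm_of_pairwise_lt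
        · have h1 : (pvPairs ft).filter (fun p => decide (t ≤ p.1))
              = ((PySem.List.enumerate ft 0).filter (fun x => decide (t ≤ x.2))).map
                  (fun p => (p.2, p.1 + 1)) := by
            rw [pvPairs_eq, List.filter_map]
            rfl
          have h2 : (g :: (G' ++ R))
              = (pvS0 ft).filter (fun p => decide (t ≤ p.1)) := by
            rw [← List.cons_append, ← hSplit, eq1]
          rw [← h1, h2]
          exact ((pvSorted2_perm_pairs ft).filter _).symm
        · refine List.Pairwise.map _ ?_
            ((PySem.List.pairwise_lt_enumerate ft 0).sublist List.filter_sublist)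
          intro a b hab
          dsimp only
          omega
      have halive : (PySem.List.enumerate ft 0).filterMap
            (fun q => if t ≤ q.2 then some (q.1 + 1) else none)
          = (((PySem.List.enumerate ft 0).filter (fun x => decide (t ≤ x.2))).map
              (fun p => (p.2, p.1 + 1))).map (fun q => q.2) := by
        rw [pvFilterMap_if (fun q : Int × Int => t ≤ q.2) (fun q => q.1 + 1) _]
        rw [List.map_map]
        rfl
      have hlenW : ((((PySem.List.enumerate ft 0).filter (fun x => decide (t ≤ x.2))).map
            (fun p : Int × Int => (p.2, p.1 + 1))).length : Nat)
          = ((g :: (G' ++ R)).length : Nat) := by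
        rw [← hW, PySem.List.length_sorted]
      simp only [pvOut]
      rw [halive, List.map_map]
      have hlen2 : (((((PySem.List.enumerate ft 0).filter (fun x => decide (t ≤ x.2))).map
            ((fun q : Int × Int => q.2) ∘ (fun p : Int × Int => (p.2, p.1 + 1)))).length : Nat) : Int)
          = (((g :: (G' ++ R)).length : Nat) : Int) := by
        rw [List.length_map, ← hlenW, List.length_map]
      rw [hlen2]
      have hnpos : (0 : Int) < (((g :: (G' ++ R)).length : Nat) : Int) := by
        simp only [List.length_cons]
        omega
      have hj0 : 0 ≤ PySem.Int.mod (k - spent) (((g :: (G' ++ R)).length : Nat) : Int) :=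
        PySem.Int.mod_nonneg _ hnpos
      rw [hW]
      rw [PySem.List.pyGet?_of_nonneg _ hj0, PySem.List.pyGet?_of_nonneg _ hj0]
      rw [List.getElem?_map, List.getElem?_map]
      cases hx : ((PySem.List.enumerate ft 0).filter
          (fun x => decide (t ≤ x.2)))[(PySem.Int.mod (k - spent)
            (((g :: (G' ++ R)).length : Nat) : Int)).toNat]? with
      | none => rfl
      | some q => rfl
    · -- the whole group of time t is eaten
      have hk : (t - p) * (((G ++ R).length : Nat) : Int) ≤ k - spent := by
        have : pvCum ft t ≤ k := not_lt.1 hstop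
        linarith [hnum]
      rw [pvLoopA_spend G R t p _ _ hGne hGall htp hk]
      have hkeq : k - spent - (t - p) * (((G ++ R).length : Nat) : Int) = k - pvCum ft t := by
        linarith [hnum]
      rw [harith, hkeq]
      simp only [pvLin]
      rw [if_neg hstop]
      have hsuf' : ts' <:+ pvD ft := (List.suffix_cons t ts').trans hsuf
      have hres := ih t (pvCum ft t) hsuf'
        (by
          intro t' ht'
          have hmem : t' ∈ ts' := List.mem_of_mem_head? ht'
          have := List.rel_of_pairwise_cons hsufp hmem
          omega)
        (by
          intro t' ht'
          cases hts' : ts' with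
          | nil => rw [hts'] at ht'; simp at ht'
          | cons b rest =>
            rw [hts'] at ht'
            have hb : t' = b := by symm; simpa using ht'
            subst hb
            have htb : t < t' := by
              have : t' ∈ ts' := by rw [hts']; exact List.mem_cons_self
              exact List.rel_of_pairwise_cons hsufp this
            have hadj : ∀ x ∈ ft, x ≤ t ∨ t' ≤ x := by
              intro x hx
              rcases pvSuffix_facts ft (t :: ts') hsuf x hx with h | h
              · rcases List.mem_cons.1 h with rfl | h
                · exact Or.inl le_rfl
                · rw [hts'] at h
                  rcases List.mem_cons.1 h with rfl | h
                  · exact Or.inr le_rfl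
                  · have hp2 : (t' :: rest).Pairwise (· < ·) := by
                      have := hsufp.of_cons
                      rw [hts'] at this
                      exact this
                    have := List.rel_of_pairwise_cons hp2 h
                    omega
              · have := h t List.mem_cons_self
                omega
            have := pvCum_gap ft t t' (le_of_lt htb) hadj
            omega)
      rw [← hR] at hres
      exact hres

-- ===== stage 1: A equals the linear scan over the candidate levels =====

theorem pvA_eq_lin (ft : List Int) (k : Int) :
    solution ft k = pvLin ft k (pvCand ft) 0 := by
  unfold solution
  have hfull : (pvS0 ft).filter (fun q => decide (q.1 ∈ pvD ft)) = pvS0 ft := by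
    rw [List.filter_eq_self]
    intro p hp
    have := pvMem_S0 ft p hp
    simp only [decide_eq_true_eq]
    exact (PySem.List.mem_sorted _ _ _ _).2 ((PySem.Set.mem_ofList ft p.1).2 this)
  have hlen : ((pvS0 ft).length : Int) = (ft.length : Int) := by
    rw [(pvSorted2_perm_pairs ft).length_eq, pvPairs_length]
  have hts0 : (pvD ft).Pairwise (· < ·) := PySem.List.sorted_ofList_pairwise_lt (κ := Int) ft
  have hmemD : ∀ x ∈ ft, x ∈ pvD ft := by
    intro x hx
    exact (PySem.List.mem_sorted _ _ _ x).2 ((PySem.Set.mem_ofList ft x).2 hx)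
  show pvLoopA (pvS0 ft) 0 (ft.length : Int) k = pvLin ft k (pvCand ft) 0
  cases hD : pvD ft with
  | nil =>
    have hS0nil : pvS0 ft = [] := by
      rw [← hfull, hD]
      simp
    rw [hS0nil]
    have hcand : pvCand ft = [] := by unfold pvCand; rw [hD]
    rw [hcand]
    rfl
  | cons d D' =>
    have hpwD : (d :: D').Pairwise (· < ·) := by rw [← hD]; exact hts0
    have hbase : pvLoopA (pvS0 ft) 0 (ft.length : Int) k
        = pvLoopA ((pvS0 ft).filter (fun q => decide (q.1 ∈ pvD ft))) 0
          (((((pvS0 ft).filter (fun q => decide (q.1 ∈ pvD ft))).length : Nat) : Int)) (k - 0) := by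
      rw [hfull, hlen, sub_zero]
    rw [hbase]
    by_cases hd : d = 0
    · -- min time 0 is skipped with no spend; recurse on D'
      subst hd
      have hsufD : (0 :: D') <:+ pvD ft := by rw [hD]
      obtain ⟨hSplit, _⟩ := pvSplit ft 0 D' hsufD
      have hG0all : ∀ p ∈ (pvS0 ft).filter (fun p => decide (p.1 = 0)), p.1 = (0 : Int) := by
        intro p hp
        simpa using (List.mem_filter.1 hp).2
      have hDmem : (pvS0 ft).filter (fun q => decide (q.1 ∈ pvD ft))
          = (pvS0 ft).filter (fun q => decide (q.1 ∈ (0 : Int) :: D')) := by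
        rw [hD]
      rw [hDmem, hSplit]
      rw [pvLoopA_skip _ _ 0 _ _ hG0all]
      have harith : ((((pvS0 ft).filter (fun p => decide (p.1 = 0))
            ++ (pvS0 ft).filter (fun q => decide (q.1 ∈ D'))).length : Nat) : Int)
          - (((pvS0 ft).filter (fun p => decide (p.1 = 0))).length : Int)
          = ((((pvS0 ft).filter (fun q => decide (q.1 ∈ D'))).length : Nat) : Int) := by
        simp only [List.length_append]
        push_cast
        ring
      rw [harith]
      have hall0 : ∀ x ∈ ft, (0 : Int) ≤ x := by
        intro x hx
        have := hmemD x hx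
        rw [hD] at this
        rcases List.mem_cons.1 this with rfl | h
        · exact le_rfl
        · have := List.rel_of_pairwise_cons hpwD h
          omega
      have hcand : pvCand ft = D' := by
        unfold pvCand
        rw [hD]
        simp
      rw [hcand]
      apply pvMain2 ft k D' 0 0 ((List.suffix_cons 0 D').trans hsufD)
      · intro t' ht'
        have hmem : t' ∈ D' := List.mem_of_mem_head? ht'
        have := List.rel_of_pairwise_cons hpwD hmem
        omega
      · intro t' ht'
        cases hts' : D' with
        | nil => rw [hts'] at ht'; simp at ht'
        | cons b rest =>
          rw [hts'] at ht'
          have hb : t' = b := by symm; simpa using ht'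
          subst hb
          have htb : (0 : Int) < t' := by
            have : t' ∈ D' := by rw [hts']; exact List.mem_cons_self
            exact List.rel_of_pairwise_cons hpwD this
          have hadj : ∀ x ∈ ft, x ≤ 0 ∨ t' ≤ x := by
            intro x hx
            have := hmemD x hx
            rw [hD, hts'] at this
            rcases List.mem_cons.1 this with rfl | h
            · exact Or.inl le_rfl
            · rcases List.mem_cons.1 h with rfl | h
              · exact Or.inr le_rfl
              · have hp2 : (t' :: rest).Pairwise (· < ·) := by
                  have := hpwD.of_cons
                  rw [hts'] at this
                  exact this
                have := List.rel_of_pairwise_cons hp2 h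
                omega
          have hz : pvCum ft 0 = 0 := pvCum_zero ft hall0
          have := pvCum_gap ft 0 t' (le_of_lt htb) hadj
          omega
    · -- min time d ≠ 0: scan all of D
      have hcand : pvCand ft = d :: D' := by
        unfold pvCand
        rw [hD]
        simp [hd]
      rw [hcand, ← hD]
      apply pvMain2 ft k (pvD ft) 0 0 (List.suffix_refl _)
      · intro t' ht'
        rw [hD] at ht'
        have hb : t' = d := by symm; simpa using ht'
        subst hb
        exact hd
      · intro t' ht'
        rw [hD] at ht'
        have hb : t' = d := by symm; simpa using ht'
        subst hb
        have hmin : ∀ x ∈ ft, t' ≤ x := by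
          intro x hx
          have := hmemD x hx
          rw [hD] at this
          rcases List.mem_cons.1 this with rfl | h
          · exact le_rfl
          · have := List.rel_of_pairwise_cons hpwD h
            omega
        rw [pvCum_min ft t' hmin, pvCntGE_all ft t' hmin]
        ring

-- ===== stage 2: B's bisection equals the linear scan =====

theorem pvBS_props (ft cand : List Int) (k : Int)
    (mono : ∀ i j : Nat, i ≤ j → j < cand.length →
      k < pvCum ft (cand.getD i 0) → k < pvCum ft (cand.getD j 0)) :
    ∀ (n lo hi : Nat), hi - lo ≤ n → lo ≤ hi → hi ≤ cand.length →
    (∀ i < lo, ¬ k < pvCum ft (cand.getD i 0)) →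
    (∀ i, hi ≤ i → i < cand.length → k < pvCum ft (cand.getD i 0)) →
    (∀ i < pvBS ft cand k lo hi, ¬ k < pvCum ft (cand.getD i 0)) ∧
    (pvBS ft cand k lo hi < cand.length → k < pvCum ft (cand.getD (pvBS ft cand k lo hi) 0)) ∧
    pvBS ft cand k lo hi ≤ cand.length := by
  intro n
  induction n with
  | zero =>
    intro lo hi hfuel hlh hhl hlow hhigh
    have : lo = hi := by omega
    subst this
    rw [pvBS]
    simp only [lt_irrefl, dite_false]
    exact ⟨hlow, fun h => hhigh lo le_rfl h, hhl⟩
  | succ m ih =>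
    intro lo hi hfuel hlh hhl hlow hhigh
    rw [pvBS]
    by_cases h : lo < hi
    · simp only [h, dite_true]
      by_cases hp : k < pvCum ft (cand.getD ((lo + hi) / 2) 0)
      · simp only [hp, if_true]
        apply ih lo ((lo + hi) / 2) (by omega) (by omega) (by omega) hlow
        intro i hmi hil
        exact mono ((lo + hi) / 2) i hmi hil hp
      · simp only [hp, if_false]
        apply ih ((lo + hi) / 2 + 1) hi (by omega) (by omega) hhl _ hhigh
        intro i hi2 hc
        exact hp (mono i ((lo + hi) / 2) (by omega) (by omega) hc)
    · simp only [h, dite_false]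
      have : lo = hi := by omega
      subst this
      exact ⟨hlow, fun hh => hhigh lo le_rfl hh, hhl⟩

-- the linear scan, characterised by the first index whose cumulative cost exceeds k
theorem pvLin_char (ft : List Int) (k : Int) : ∀ (cs : List Int) (s : Int) (j : Nat),
    j ≤ cs.length →
    (∀ i < j, ¬ k < pvCum ft (cs.getD i 0)) →
    (j < cs.length → k < pvCum ft (cs.getD j 0)) →
    pvLin ft k cs s = if j < cs.length
      then pvOut ft k (cs.getD j 0) (if j = 0 then s else pvCum ft (cs.getD (j - 1) 0))
      else -1 := by
  intro cs
  induction cs with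
  | nil =>
    intro s j hj _ _
    simp only [List.length_nil, Nat.not_lt_zero, if_false]
    rfl
  | cons c cs' ih =>
    intro s j hj hlow hhit
    simp only [pvLin]
    by_cases hp : k < pvCum ft c
    · have hj0 : j = 0 := by
        by_contra hne
        exact hlow 0 (by omega) (by simpa using hp)
      subst hj0
      simp only [hp, if_true, List.length_cons]
      rw [if_pos (by omega)]
      simp
    · have hj0 : j ≠ 0 := by
        intro h0
        subst h0
        have := hhit (by simp)
        simp only [List.getD_cons_zero] at this
        exact hp this
      obtain ⟨j', rfl⟩ : ∃ j', j = j' + 1 := ⟨j - 1, by omega⟩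
      rw [if_neg hp]
      rw [ih (pvCum ft c) j' (by simpa using hj)
        (by
          intro i hi
          have := hlow (i + 1) (by omega)
          simpa using this)
        (by
          intro hlt
          have := hhit (by simpa using hlt)
          simpa using this)]
      rw [if_neg hj0]
      by_cases hlt : j' < cs'.length
      · rw [if_pos hlt, if_pos (show j' + 1 < (c :: cs').length by simpa using hlt)]
        congr 1
        all_goals
          cases j' with
          | zero => simp
          | succ j'' => simp
      · rw [if_neg hlt, if_neg (show ¬ (j' + 1 < (c :: cs').length) by simpa using hlt)]

theorem pvCand_pairwise (ft : List Int) : (pvCand ft).Pairwise (· < ·) := by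
  have hts0 : (pvD ft).Pairwise (· < ·) := PySem.List.sorted_ofList_pairwise_lt (κ := Int) ft
  unfold pvCand
  cases hD : pvD ft with
  | nil => exact List.Pairwise.nil
  | cons d rest =>
    rw [hD] at hts0
    by_cases hd : d = 0
    · simp only [hd, if_pos]
      exact hts0.of_cons
    · simp only [hd, if_false]
      exact hts0

theorem pvAlt_eq_lin (ft : List Int) (k : Int) :
    solution_alt ft k = pvLin ft k (pvCand ft) 0 := by
  have halt : solution_alt ft k =
      (if pvBS ft (pvCand ft) k 0 (pvCand ft).length = (pvCand ft).length then (-1 : Int)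
       else
         pvOut ft k ((pvCand ft).getD (pvBS ft (pvCand ft) k 0 (pvCand ft).length) 0)
           (if 0 < pvBS ft (pvCand ft) k 0 (pvCand ft).length then
              pvCum ft ((pvCand ft).getD (pvBS ft (pvCand ft) k 0 (pvCand ft).length - 1) 0)
            else 0)) := rfl
  rw [halt]
  have hpw := pvCand_pairwise ft
  have mono : ∀ i j : Nat, i ≤ j → j < (pvCand ft).length →
      k < pvCum ft ((pvCand ft).getD i 0) → k < pvCum ft ((pvCand ft).getD j 0) := by
    intro i j hij hj hP
    have hi : i < (pvCand ft).length := by omega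
    rcases Nat.lt_or_ge i j with hlt | hge
    · have hle : (pvCand ft).getD i 0 ≤ (pvCand ft).getD j 0 := by
        rw [List.getD_eq_getElem _ _ hi, List.getD_eq_getElem _ _ hj]
        have := (List.pairwise_iff_getElem.1 hpw) i j hi hj hlt
        omega
      exact lt_of_lt_of_le hP (pvCum_mono ft hle)
    · have : i = j := by omega
      subst this
      exact hP
  obtain ⟨h1, h2, h3⟩ := pvBS_props ft (pvCand ft) k mono (pvCand ft).length 0
    (pvCand ft).length (by omega) (by omega) le_rfl
    (by intro i hi; omega)
    (by intro i hi hlt; omega)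
  rw [pvLin_char ft k (pvCand ft) 0 (pvBS ft (pvCand ft) k 0 (pvCand ft).length) h3 h1 h2]
  by_cases hr : pvBS ft (pvCand ft) k 0 (pvCand ft).length = (pvCand ft).length
  · have hnlt : ¬ pvBS ft (pvCand ft) k 0 (pvCand ft).length < (pvCand ft).length := by omega
    rw [if_pos hr, if_neg hnlt]
  · have hlt : pvBS ft (pvCand ft) k 0 (pvCand ft).length < (pvCand ft).length := by omega
    rw [if_neg hr, if_pos hlt]
    by_cases hz : pvBS ft (pvCand ft) k 0 (pvCand ft).length = 0
    · have h0 : ¬ 0 < pvBS ft (pvCand ft) k 0 (pvCand ft).length := by omega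
      rw [if_neg h0, if_pos hz]
    · have h0 : 0 < pvBS ft (pvCand ft) k 0 (pvCand ft).length := by omega
      rw [if_pos h0, if_neg hz]

-- ===== VERDICT (by name: the statement is the Claim_ definition above) =====
theorem solution_spec : Claim_equal_solution := by
  intro ft k _
  unfold Spec_solution
  rw [pvAlt_eq_lin]
  exact pvA_eq_lin ft k
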